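-- pv_equiv track=rewrite | github.com/sannny/Netflix-Image-Subtitle-Crawler | cleaning_hindi_csv.py | timeStr_sanity_check
-- ===== SOURCE A (Python) =====
-- def timeStr_sanity_check(timestr):
--     coln_split = timestr.split(':')
--     if len(coln_split) == 3:
--         if '.' in coln_split[-1]:
--             return timestr
--         else:
--             return ''.join([timestr,'.000000'])
--     else:
--         no_of_appends = 3 - len(coln_split)
--         i = 1
--         while i <= no_of_appends:
--             if i == no_of_appends:
--                 timestr = ''.join([timestr,'00.000000'])
--             else:
--                 timestr = ''.join([timestr,'00:'])
--             i+=1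
--     return timestr
-- ===== SOURCE B (Python) =====
-- def timeStr_sanity_check(timestr):
--     # Single streaming pass over the characters: count colons and track whether a '.'
--     # occurs after the last ':'; then append the needed suffix once. Never builds the
--     # split list, so no intermediate list of parts exists.
--     colons = 0
--     dot_after = False
--     for ch in timestr:
--         if ch == ':':
--             colons += 1
--             dot_after = False
--         elif ch == '.':
--             dot_after = True
--     if colons == 2:
--         return timestr if dot_after else timestr + '.000000'
--     if colons == 1:
--         return timestr + '00.000000'
--     if colons == 0:
--         return timestr + '00:00.000000'
--     return timestr
-- ===== Notes on version B (the rewrite author's own statement) =====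
-- stated objective: alternative
-- what changed: Replaces split-then-branch/loop with a single streaming pass over the characters that counts colons and tracks whether a dot occurs after the last colon, then appends the needed suffix once; no split list is ever built.
import Mathlib
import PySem

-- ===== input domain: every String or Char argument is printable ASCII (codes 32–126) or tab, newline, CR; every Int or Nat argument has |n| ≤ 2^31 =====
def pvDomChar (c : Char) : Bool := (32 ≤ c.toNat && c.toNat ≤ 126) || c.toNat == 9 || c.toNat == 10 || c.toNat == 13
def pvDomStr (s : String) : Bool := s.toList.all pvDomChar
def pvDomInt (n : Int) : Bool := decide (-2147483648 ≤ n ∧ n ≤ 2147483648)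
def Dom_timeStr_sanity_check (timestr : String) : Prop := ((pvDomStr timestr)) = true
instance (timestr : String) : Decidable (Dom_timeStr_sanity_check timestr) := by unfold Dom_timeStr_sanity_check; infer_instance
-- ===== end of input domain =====

-- B replaces A's split-then-branch/loop with one streaming pass over the characters
-- (colon count + dot-after-last-colon flag); objective: alternative.

-- ===== PORT A =====
-- A's while loop: i counts from 1 up to no_of_appends, appending '00:' (or '00.000000' on the last pass).
def tsLoop (noa : Int) (i : Int) (timestr : String) : String :=
  if i ≤ noa then
    if i = noa then tsLoop noa (i + 1) (PySem.Str.join "" [timestr, "00.000000"])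
    else tsLoop noa (i + 1) (PySem.Str.join "" [timestr, "00:"])
  else timestr
termination_by (noa + 1 - i).toNat
decreasing_by all_goals omega

def timeStr_sanity_check (timestr : String) : String :=
  let coln_split := (PySem.Str.split? timestr ":").getD []   -- sep ":" ≠ "", so split? is always some
  if coln_split.length = 3 then
    if PySem.Str.isIn "." (PySem.List.pyGetD coln_split (-1) "") then timestr
    else PySem.Str.join "" [timestr, ".000000"]
  else
    tsLoop (3 - (coln_split.length : Int)) 1 timestr

-- ===== PORT B =====
-- The body of Source B's for-loop, as a fold step over (colons, dot_after).
def bStep (s : Int × Bool) (c : Char) : Int × Bool :=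
  if c = ':' then (s.1 + 1, false) else if c = '.' then (s.1, true) else s

-- Python '+' on strings is ported as PySem.Str.join "" [·, ·] (exact: concatenation).
def timeStr_sanity_check_alt (timestr : String) : String :=
  let st := timestr.toList.foldl bStep (0, false)
  if st.1 = 2 then (if st.2 then timestr else PySem.Str.join "" [timestr, ".000000"])
  else if st.1 = 1 then PySem.Str.join "" [timestr, "00.000000"]
  else if st.1 = 0 then PySem.Str.join "" [timestr, "00:00.000000"]
  else timestr

-- ===== PRECONDITION & SPEC =====
def Spec_timeStr_sanity_check (timestr : String) (out : String) : Prop := out = timeStr_sanity_check_alt timestr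
instance (timestr : String) (out : String) : Decidable (Spec_timeStr_sanity_check timestr out) := by unfold Spec_timeStr_sanity_check; infer_instance

-- ===== CLAIM (what is proved, stated in full; the proofs are below) =====
def Claim_equal_timeStr_sanity_check : Prop := ∀ (timestr : String), Dom_timeStr_sanity_check timestr → Spec_timeStr_sanity_check timestr (timeStr_sanity_check timestr)

-- ===== LEMMAS AND PROOFS =====

-- Reference splitter: splitOn on the single-char separator ':'.
def mySplit : List Char → List (List Char)
  | [] => [[]]
  | c :: rest => if c = ':' then [] :: mySplit rest
                 else (c :: (mySplit rest).headD []) :: (mySplit rest).tail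

theorem mySplit_ne_nil (l : List Char) : mySplit l ≠ [] := by
  cases l with
  | nil => simp [mySplit]
  | cons c rest => simp only [mySplit]; split <;> simp

theorem mySplit_length (l : List Char) : (mySplit l).length = l.count ':' + 1 := by
  induction l with
  | nil => simp [mySplit]
  | cons c rest ih =>
    simp only [mySplit]
    by_cases h : c = ':'
    · simp [h, ih]
    · have hne := mySplit_ne_nil rest
      cases hm : mySplit rest with
      | nil => exact absurd hm hne
      | cons p ps =>
        rw [hm] at ih
        simp [h] at ih ⊢
        omega

-- dot-after-last-colon flag, as a left recursion (the spec of Source B's loop flag).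
def dspec : Bool → List Char → Bool
  | d, [] => d
  | d, c :: rest => dspec (if c = ':' then false else if c = '.' then true else d) rest

theorem foldl_bStep_fst (l : List Char) (k : Int) (d : Bool) :
    (l.foldl bStep (k, d)).1 = k + (l.count ':' : Int) := by
  induction l generalizing k d with
  | nil => simp
  | cons c rest ih =>
    simp only [List.foldl_cons, bStep, List.count_cons]
    by_cases h : c = ':'
    · simp [h, ih]; ring
    · by_cases h2 : c = '.' <;> simp [h, h2, ih]

theorem foldl_bStep_snd (l : List Char) (k : Int) (d : Bool) :
    (l.foldl bStep (k, d)).2 = dspec d l := by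
  induction l generalizing k d with
  | nil => simp [dspec]
  | cons c rest ih =>
    simp only [List.foldl_cons, bStep, dspec]
    split <;> [skip; split] <;> simp [ih]

theorem dspec_no_colon (l : List Char) (h : ':' ∉ l) (d : Bool) :
    dspec d l = (d || decide ('.' ∈ l)) := by
  induction l generalizing d with
  | nil => simp [dspec]
  | cons c rest ih =>
    simp only [List.mem_cons, not_or] at h
    have hc : ¬ c = ':' := fun e => h.1 e.symm
    simp only [dspec, if_neg hc]
    by_cases h2 : c = '.'
    · simp [h2, ih h.2]
    · have h2' : ¬ '.' = c := fun e => h2 e.symm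
      simp [h2, ih h.2, h2']

theorem mySplit_no_colon (l : List Char) (h : ':' ∉ l) : mySplit l = [l] := by
  induction l with
  | nil => rfl
  | cons c rest ih =>
    simp only [List.mem_cons, not_or] at h
    have hc : ¬ c = ':' := fun e => h.1 e.symm
    simp [mySplit, hc, ih h.2]

theorem dspec_last (l : List Char) (h : ':' ∈ l) (d : Bool) :
    dspec d l = decide ('.' ∈ (mySplit l).getLastD []) := by
  induction l generalizing d with
  | nil => simp at h
  | cons c rest ih =>
    by_cases hc : c = ':'
    · subst hc
      have hd : dspec d (':' :: rest) = dspec false rest := by simp [dspec]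
      have hs : mySplit (':' :: rest) = [] :: mySplit rest := by simp [mySplit]
      by_cases hr : ':' ∈ rest
      · rw [hd, ih hr false, hs]
        cases hm : mySplit rest with
        | nil => exact absurd hm (mySplit_ne_nil rest)
        | cons p ps => simp
      · rw [hd, dspec_no_colon rest hr false, hs, mySplit_no_colon rest hr]
        simp
    · have hr : ':' ∈ rest := by
        rcases List.mem_cons.mp h with h1 | h1
        · exact absurd h1.symm hc
        · exact h1
      have hlen : 2 ≤ (mySplit rest).length := by
        have := mySplit_length rest
        have : 0 < rest.count ':' := List.count_pos_iff.mpr hr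
        omega
      obtain ⟨p, q, t, hm⟩ : ∃ p q t, mySplit rest = p :: q :: t := by
        cases hm : mySplit rest with
        | nil => simp [hm] at hlen
        | cons p ps =>
          cases ps with
          | nil => simp [hm] at hlen
          | cons q t => exact ⟨p, q, t, rfl⟩
      simp only [dspec, mySplit, if_neg hc, hm]
      split <;> rw [ih hr _] <;> simp [hm]

-- splitOn on ':' computes mySplit.
theorem go_eq (fuel : Nat) : ∀ (l cur : List Char) (acc : List (List Char)), l.length ≤ fuel →
    PySem.Chars.splitOn.go [':'] fuel l cur acc
      = acc.reverse ++ (cur.reverse ++ (mySplit l).headD []) :: (mySplit l).tail := by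
  induction fuel with
  | zero =>
    intro l cur acc hl
    have : l = [] := List.length_eq_zero_iff.mp (Nat.le_zero.mp hl)
    subst this
    rw [PySem.Chars.splitOn.go]
    simp [mySplit]
  | succ n ih =>
    intro l cur acc hl
    cases l with
    | nil =>
      rw [PySem.Chars.splitOn.go]
      simp [mySplit]
      omega
    | cons c rest =>
      rw [PySem.Chars.splitOn.go]
      simp only [List.length_cons] at hl
      by_cases hc : c = ':'
      · subst hc
        rw [if_pos (by simp [List.isPrefixOf])]
        simp only [List.length_cons, List.length_nil, List.drop_succ_cons, List.drop_zero]
        rw [ih rest [] (cur.reverse :: acc) (by omega)]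
        cases hm : mySplit rest with
        | nil => exact absurd hm (mySplit_ne_nil rest)
        | cons p ps => simp [mySplit, hm]
      · rw [if_neg (by simp [List.isPrefixOf]; exact fun e => hc e.symm)]
        rw [ih rest (c :: cur) acc (by omega)]
        simp [mySplit, hc]

theorem splitOn_colon (l : List Char) : PySem.Chars.splitOn l [':'] = mySplit l := by
  unfold PySem.Chars.splitOn
  rw [go_eq (l.length + 1) l [] [] (by omega)]
  cases hm : mySplit l with
  | nil => exact absurd hm (mySplit_ne_nil l)
  | cons p ps => simp

theorem coln_split_eq (t : String) :
    (PySem.Str.split? t ":").getD [] = List.map String.ofList (mySplit t.toList) := by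
  simp [PySem.Str.split?, PySem.Chars.split?, splitOn_colon, show (":" : String).toList = [':'] from rfl]

theorem tsLoop_stop (noa i : Int) (t : String) (h : noa < i) : tsLoop noa i t = t := by
  rw [tsLoop]
  simp [show ¬ i ≤ noa by omega]

theorem join_join_assoc (t : String) :
    PySem.Str.join "" [PySem.Str.join "" [t, "00:"], "00.000000"] =
    PySem.Str.join "" [t, "00:00.000000"] := by
  apply String.toList_inj.mp
  simp [PySem.Str.toList_join, PySem.Chars.join_cons_cons, PySem.Chars.join_singleton]

-- singleton substring test = membership
theorem isIn_singleton (a : Char) (l : List Char) :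
    PySem.Chars.isIn [a] l = decide (a ∈ l) := by
  by_cases h : a ∈ l
  · rw [(PySem.Chars.isIn_iff_infix _ _).mpr ?_, decide_eq_true h]
    obtain ⟨s, u, rfl⟩ := List.append_of_mem h
    exact ⟨s, u, by simp⟩
  · rw [(PySem.Chars.isIn_eq_false_iff _ _).mpr ?_, decide_eq_false h]
    intro hinf
    exact h (hinf.sublist.subset (by simp))

-- ===== VERDICT (by name: the statement is the Claim_ definition above) =====
theorem timeStr_sanity_check_spec : Claim_equal_timeStr_sanity_check := by
  intro t _
  unfold Spec_timeStr_sanity_check timeStr_sanity_check timeStr_sanity_check_alt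
  have hfst := foldl_bStep_fst t.toList 0 false
  have hsnd := foldl_bStep_snd t.toList 0 false
  simp only [zero_add] at hfst
  have hlen : (List.map String.ofList (mySplit t.toList)).length = t.toList.count ':' + 1 := by
    simp [mySplit_length]
  simp only [coln_split_eq, hfst, hsnd, hlen]
  rcases hkc : t.toList.count ':' with _ | _ | _ | m
  · -- no colon: A's loop runs twice
    norm_num
    rw [tsLoop]; norm_num
    rw [tsLoop]; norm_num
    rw [tsLoop_stop _ _ _ (by norm_num)]
    exact join_join_assoc t
  · -- one colon: A's loop runs once
    norm_num
    rw [tsLoop]; norm_num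
    rw [tsLoop_stop _ _ _ (by norm_num)]
  · -- two colons: three parts; the last part's dot test equals the streaming flag
    norm_num
    have hcol : ':' ∈ t.toList := List.count_pos_iff.mp (by omega)
    have hlen3 : (mySplit t.toList).length = 3 := by rw [mySplit_length, hkc]
    obtain ⟨p0, p1, p2, hm⟩ : ∃ p0 p1 p2, mySplit t.toList = [p0, p1, p2] := by
      cases h0 : mySplit t.toList with
      | nil => simp [h0] at hlen3
      | cons a l1 => cases l1 with
        | nil => simp [h0] at hlen3
        | cons b l2 => cases l2 with
          | nil => simp [h0] at hlen3
          | cons c l3 =>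
            cases l3 with
            | nil => exact ⟨a, b, c, rfl⟩
            | cons d l4 => simp [h0] at hlen3
    rw [dspec_last t.toList hcol false, hm]
    simp only [List.map_cons, List.map_nil, List.getLastD]
    have hget : PySem.List.pyGetD [String.ofList p0, String.ofList p1, String.ofList p2] (-1) "" = String.ofList p2 := rfl
    simp only [hget]
    have hiI : PySem.Chars.isIn ("." : String).toList (String.ofList p2).toList = decide ('.' ∈ p2) := by
      have h1 : (String.ofList p2).toList = p2 := by simp
      rw [show ("." : String).toList = ['.'] from rfl, h1, isIn_singleton]
    simp only [hiI]
    by_cases hd : '.' ∈ p2 <;> simp [hd]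
  · -- three or more colons: A's loop does not run
    rw [if_neg (by omega)]
    rw [tsLoop_stop _ _ _ (by push_cast; omega)]
    rw [if_neg (by push_cast; omega), if_neg (by push_cast; omega), if_neg (by push_cast; omega)]
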